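-- pv_equiv track=rewrite | github.com/The-R34per/interesting-scripts | Other/Lateral Movement Path Visualizer/lateral_movement.py | infer_edges
-- ===== SOURCE A (Python) =====
-- from collections import defaultdict
--
-- def infer_edges(hosts, host_users, host_shares):
--     """
--     Build host-to-host edges based on:
--     - Shared users across hosts (via_type='user')
--     - Shares on a host that other hosts could potentially reach (via_type='share')
--     """
--     edges = set()
--
--     # Shared users → potential credential reuse paths
--     user_hosts = defaultdict(set)
--     for host, users in host_users.items():
--         for u in users:
--             user_hosts[u].add(host)
--
--     for user, hset in user_hosts.items():
--         hlist = sorted(hset)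
--         for i in range(len(hlist)):
--             for j in range(i + 1, len(hlist)):
--                 h1, h2 = hlist[i], hlist[j]
--                 edges.add((h1, h2, "user", user))
--                 edges.add((h2, h1, "user", user))
--
--     # Shares → potential file-based pivot paths
--     # Simple model: any other host in the hosts list could potentially reach the share host.
--     for share_host, shares in host_shares.items():
--         for share_name, access in shares:
--             for src_host in hosts:
--                 if src_host == share_host:
--                     continue
--                 via_value = f"{share_name} ({access})"
--                 edges.add((src_host, share_host, "share", via_value))
--
--     return edges
-- ===== SOURCE B (Python) =====
-- def infer_edges(hosts, host_users, host_shares):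
--     """Same edge set as A, computed per distinct user by rescanning host_users
--     instead of building an inverted user->hosts index."""
--     edges = set()
--
--     # Shared users -> potential credential reuse paths
--     for user in dict.fromkeys(u for users in host_users.values() for u in users):
--         hs = sorted({h for h, users in host_users.items() if user in users})
--         for i, h1 in enumerate(hs):
--             for h2 in hs[i + 1:]:
--                 edges.add((h1, h2, "user", user))
--                 edges.add((h2, h1, "user", user))
--
--     # Shares -> potential file-based pivot paths
--     for share_host, shares in host_shares.items():
--         for share_name, access in shares:
--             for src_host in hosts:
--                 if src_host == share_host:
--                     continue
--                 edges.add((src_host, share_host, "share", f"{share_name} ({access})"))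
--
--     return edges
-- ===== Notes on version B (the rewrite author's own statement) =====
-- stated objective: alternative
-- what changed: The shared-user half no longer builds an inverted user->hosts index: B iterates over the distinct users (dict.fromkeys, first-appearance order) and for each user rescans host_users with a set comprehension to collect its hosts, then pairs them with enumerate and a slice instead of a double index loop; the share half is the same triple-nested emission.
import Mathlib
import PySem

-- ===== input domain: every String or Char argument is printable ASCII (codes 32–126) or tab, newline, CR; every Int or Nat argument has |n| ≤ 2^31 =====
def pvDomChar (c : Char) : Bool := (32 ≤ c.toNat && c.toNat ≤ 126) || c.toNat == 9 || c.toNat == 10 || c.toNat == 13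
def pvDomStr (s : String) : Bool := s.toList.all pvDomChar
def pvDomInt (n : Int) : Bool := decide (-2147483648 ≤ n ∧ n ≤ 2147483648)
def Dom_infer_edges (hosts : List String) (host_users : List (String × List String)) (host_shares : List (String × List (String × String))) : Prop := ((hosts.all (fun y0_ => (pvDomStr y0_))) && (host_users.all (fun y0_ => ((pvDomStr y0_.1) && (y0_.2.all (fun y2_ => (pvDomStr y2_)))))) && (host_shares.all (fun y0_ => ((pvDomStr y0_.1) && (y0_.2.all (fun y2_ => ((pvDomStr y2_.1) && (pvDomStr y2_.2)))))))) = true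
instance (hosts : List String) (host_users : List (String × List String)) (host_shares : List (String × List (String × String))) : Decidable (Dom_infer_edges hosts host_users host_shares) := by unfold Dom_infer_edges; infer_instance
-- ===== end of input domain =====

-- B replaces A's inverted user→hosts index by a per-distinct-user rescan of host_users
-- (objective: alternative decomposition, same returned set; no speed claim).

-- ===== PORT A =====
def infer_edges (hosts : List String) (host_users : List (String × List String)) (host_shares : List (String × List (String × String))) : List (String × String × String × String) :=
  -- user_hosts = defaultdict(set); for host, users in host_users.items(): for u in users: user_hosts[u].add(host)
  let user_hosts : PySem.Dict String (PySem.Set String) :=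
    (PySem.Dict.ofList host_users).items.foldl
      (fun d p => p.2.foldl (fun d u => d.modify u PySem.Set.empty (fun s => PySem.Set.add s p.1)) d)
      PySem.Dict.empty
  -- for user, hset in user_hosts.items(): hlist = sorted(hset); double index loop adding both directions
  let edges : PySem.Set (String × String × String × String) :=
    user_hosts.items.foldl
      (fun e q =>
        let hlist := PySem.List.sorted q.2 (fun x => x)
        (PySem.List.pyRange 0 (PySem.List.len hlist)).foldl
          (fun e i =>
            (PySem.List.pyRange (i + 1) (PySem.List.len hlist)).foldl
              (fun e j =>
                let h1 := PySem.List.pyGetD hlist i ""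
                let h2 := PySem.List.pyGetD hlist j ""
                PySem.Set.add (PySem.Set.add e (h1, h2, "user", q.1)) (h2, h1, "user", q.1))
              e)
          e)
      PySem.Set.empty
  -- for share_host, shares in host_shares.items(): for share_name, access in shares: for src_host in hosts: …
  (PySem.Dict.ofList host_shares).items.foldl
    (fun e p =>
      p.2.foldl
        (fun e sa =>
          hosts.foldl
            (fun e src =>
              if src == p.1 then e
              else PySem.Set.add e (src, p.1, "share", PySem.Str.join "" [sa.1, " (", sa.2, ")"]))
            e)
        e)
    edges

-- ===== PORT B =====
def infer_edges_alt (hosts : List String) (host_users : List (String × List String)) (host_shares : List (String × List (String × String))) : List (String × String × String × String) :=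
  let huItems := (PySem.Dict.ofList host_users).items
  -- for user in dict.fromkeys(u for users in host_users.values() for u in users):
  let edges : PySem.Set (String × String × String × String) :=
    (PySem.List.dedup ((huItems.map (fun p => p.2)).flatten)).foldl
      (fun e user =>
        -- hs = sorted({h for h, users in host_users.items() if user in users})
        let hs := PySem.List.sorted
          (PySem.Set.ofList ((huItems.filter (fun p => p.2.contains user)).map (fun p => p.1)))
          (fun x => x)
        -- for i, h1 in enumerate(hs): for h2 in hs[i+1:]:
        (PySem.List.enumerate hs).foldl
          (fun e q =>
            (PySem.List.slice hs (some (q.1 + 1))).foldl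
              (fun e h2 =>
                PySem.Set.add (PySem.Set.add e (q.2, h2, "user", user)) (h2, q.2, "user", user))
              e)
          e)
      PySem.Set.empty
  (PySem.Dict.ofList host_shares).items.foldl
    (fun e p =>
      p.2.foldl
        (fun e sa =>
          hosts.foldl
            (fun e src =>
              if src == p.1 then e
              else PySem.Set.add e (src, p.1, "share", PySem.Str.join "" [sa.1, " (", sa.2, ")"]))
            e)
        e)
    edges

-- ===== PRECONDITION & SPEC =====
def Spec_infer_edges (hosts : List String) (host_users : List (String × List String)) (host_shares : List (String × List (String × String))) (out : List (String × String × String × String)) : Prop := out = infer_edges_alt hosts host_users host_shares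
instance (hosts : List String) (host_users : List (String × List String)) (host_shares : List (String × List (String × String))) (out : List (String × String × String × String)) : Decidable (Spec_infer_edges hosts host_users host_shares out) := by unfold Spec_infer_edges; infer_instance

-- ===== CLAIM (what is proved, stated in full; the proofs are below) =====
def Claim_equal_infer_edges : Prop := ∀ (hosts : List String) (host_users : List (String × List String)) (host_shares : List (String × List (String × String))), Dom_infer_edges hosts host_users host_shares → Spec_infer_edges hosts host_users host_shares (infer_edges hosts host_users host_shares)

-- ===== LEMMAS AND PROOFS =====

-- A's inverted-index building loop, named for the proofs below
def pvBuild (l : List (String × List String)) (d : PySem.Dict String (PySem.Set String)) : PySem.Dict String (PySem.Set String) :=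
  l.foldl (fun d p => p.2.foldl (fun d u => d.modify u PySem.Set.empty (fun s => PySem.Set.add s p.1)) d) d

lemma pvKeys_build (l : List (String × List String)) (d : PySem.Dict String (PySem.Set String)) :
    (pvBuild l d).keys = PySem.Set.update d.keys ((l.map (fun p => p.2)).flatten) := by
  induction l generalizing d with
  | nil => simp [pvBuild, PySem.Set.update]
  | cons p t ih =>
    simp only [pvBuild, List.foldl_cons, List.map_cons, List.flatten_cons]
    rw [show (List.foldl (fun d p => p.2.foldl (fun d u => d.modify u PySem.Set.empty (fun s => PySem.Set.add s p.1)) d) (p.2.foldl (fun d u => d.modify u PySem.Set.empty (fun s => PySem.Set.add s p.1)) d) t) = pvBuild t (p.2.foldl (fun d u => d.modify u PySem.Set.empty (fun s => PySem.Set.add s p.1)) d) from rfl]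
    rw [ih]
    rw [PySem.Dict.keys_foldl_modify_key p.2 (fun u => u) PySem.Set.empty (fun _ u s => PySem.Set.add s p.1) d]
    rw [PySem.Set.update_append]
    simp

lemma pvNodup_keys_build (l : List (String × List String)) (d : PySem.Dict String (PySem.Set String))
    (h : d.keys.Nodup) : (pvBuild l d).keys.Nodup := by
  induction l generalizing d with
  | nil => exact h
  | cons p t ih =>
    exact ih _ (PySem.Dict.nodup_keys_foldl_modify_key p.2 (fun u => u) PySem.Set.empty (fun _ u s => PySem.Set.add s p.1) d h)

lemma pvGetD_inner (us : List String) (h : String) (d : PySem.Dict String (PySem.Set String)) (u : String) :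
    (us.foldl (fun d u' => d.modify u' PySem.Set.empty (fun s => PySem.Set.add s h)) d).getD u PySem.Set.empty
      = if us.contains u then PySem.Set.add (d.getD u PySem.Set.empty) h else d.getD u PySem.Set.empty := by
  induction us generalizing d with
  | nil => simp
  | cons a t ih =>
    simp only [List.foldl_cons, ih, List.contains_cons]
    rw [PySem.Dict.getD_modify]
    by_cases hu : u = a
    · subst hu; simp
    · simp [hu]

lemma pvGetD_build (l : List (String × List String)) (d : PySem.Dict String (PySem.Set String)) (u : String) :
    (pvBuild l d).getD u PySem.Set.empty
      = PySem.Set.update (d.getD u PySem.Set.empty) ((l.filter (fun p => p.2.contains u)).map (fun p => p.1)) := by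
  induction l generalizing d with
  | nil => simp [pvBuild, PySem.Set.update]
  | cons p t ih =>
    simp only [pvBuild, List.foldl_cons, List.filter_cons]
    rw [show (List.foldl (fun d p => p.2.foldl (fun d u => d.modify u PySem.Set.empty (fun s => PySem.Set.add s p.1)) d) (p.2.foldl (fun d u => d.modify u PySem.Set.empty (fun s => PySem.Set.add s p.1)) d) t) = pvBuild t (p.2.foldl (fun d u => d.modify u PySem.Set.empty (fun s => PySem.Set.add s p.1)) d) from rfl]
    rw [ih, pvGetD_inner]
    by_cases hm : u ∈ p.2
    · simp only [hm, List.contains_iff_mem, if_pos, List.map_cons]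
      rw [PySem.Set.update_cons]
    · simp [hm]

-- the two pair-emission loops agree on any host list
lemma pvPairs_eq (hs : List String) (user : String) (e : PySem.Set (String × String × String × String)) :
    (PySem.List.pyRange 0 (PySem.List.len hs)).foldl
      (fun e i =>
        (PySem.List.pyRange (i + 1) (PySem.List.len hs)).foldl
          (fun e j =>
            PySem.Set.add (PySem.Set.add e (PySem.List.pyGetD hs i "", PySem.List.pyGetD hs j "", "user", user))
              (PySem.List.pyGetD hs j "", PySem.List.pyGetD hs i "", "user", user))
          e)
      e
    = (PySem.List.enumerate hs).foldl
        (fun e q =>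
          (PySem.List.slice hs (some (q.1 + 1))).foldl
            (fun e h2 => PySem.Set.add (PySem.Set.add e (q.2, h2, "user", user)) (h2, q.2, "user", user))
            e)
        e := by
  rw [PySem.List.enumerate_eq_map_pyRange hs "", List.foldl_map]
  apply PySem.List.foldl_congr_mem
  intro acc i hi
  have h0 : (0:Int) ≤ i + 1 := by
    have := (PySem.List.mem_pyRange_one.mp hi).1
    omega
  rw [PySem.List.slice_from hs h0]
  rw [PySem.List.foldl_pyRange_pyGetD hs "" (fun e h2 => PySem.Set.add (PySem.Set.add e (PySem.List.pyGetD hs i "", h2, "user", user)) (h2, PySem.List.pyGetD hs i "", "user", user)) acc h0]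

-- ===== VERDICT (by name: the statement is the Claim_ definition above) =====
theorem infer_edges_spec : Claim_equal_infer_edges := by
  intro hosts host_users host_shares _
  show infer_edges hosts host_users host_shares = infer_edges_alt hosts host_users host_shares
  simp only [infer_edges, infer_edges_alt]
  congr 1
  -- the two edge sets built from shared users coincide, in insertion order
  rw [show ((PySem.Dict.ofList host_users).items.foldl
      (fun d p => p.2.foldl (fun d u => d.modify u PySem.Set.empty (fun s => PySem.Set.add s p.1)) d)
      PySem.Dict.empty) = pvBuild (PySem.Dict.ofList host_users).items PySem.Dict.empty from rfl]
  rw [PySem.Dict.items_eq_map_keys _ (pvNodup_keys_build _ _ (by simp)) PySem.Set.empty]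
  rw [List.foldl_map]
  rw [pvKeys_build]
  rw [show (PySem.Dict.empty : PySem.Dict String (PySem.Set String)).keys = ([] : List String) from rfl]
  rw [show (PySem.Set.update ([] : List String) (((PySem.Dict.ofList host_users).items.map (fun p => p.2)).flatten)) = PySem.Set.ofList (((PySem.Dict.ofList host_users).items.map (fun p => p.2)).flatten) from PySem.Set.update_empty _]
  rw [PySem.List.dedup_eq_ofList]
  apply PySem.List.foldl_congr_mem
  intro acc u hu
  rw [pvGetD_build]
  rw [show (PySem.Dict.empty : PySem.Dict String (PySem.Set String)).getD u PySem.Set.empty = PySem.Set.empty from rfl]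
  rw [PySem.Set.update_empty]
  exact pvPairs_eq _ _ _
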